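-- pv_equiv track=rewrite | github.com/sathvikr/ai-stuff | ai_sudoku_solver/sudoku.py | get_neighbors_dictionary
-- ===== SOURCE A (Python) =====
-- from collections import defaultdict
--
-- def get_neighbors_dictionary(puzzle, constraint_sets):
--     neighbors = defaultdict(set)
--
--     for index, cell in enumerate(puzzle):
--         for constraint_set in constraint_sets:
--             for constrained_indices in constraint_set:
--                 if index in constrained_indices:
--                     neighbors[index] |= constrained_indices
--
--     return neighbors
-- ===== SOURCE B (Python) =====
-- from collections import defaultdict
--
-- def get_neighbors_dictionary(puzzle, constraint_sets):
--     n = len(puzzle)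
--     neighbors = defaultdict(set)
--     for constraint_set in constraint_sets:
--         for group in constraint_set:
--             for member in group:
--                 if 0 <= member < n:
--                     neighbors[member] |= group
--     return dict(sorted(neighbors.items(), key=lambda item: item[0]))
-- ===== Notes on version B (the rewrite author's own statement) =====
-- stated objective: faster
-- what changed: Inverts the loop nest: instead of scanning every constraint group once per puzzle cell, B makes a single pass over the groups and unions each group into the neighbor set of each of its in-range members, then emits the dictionary sorted by cell index.
import Mathlib
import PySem

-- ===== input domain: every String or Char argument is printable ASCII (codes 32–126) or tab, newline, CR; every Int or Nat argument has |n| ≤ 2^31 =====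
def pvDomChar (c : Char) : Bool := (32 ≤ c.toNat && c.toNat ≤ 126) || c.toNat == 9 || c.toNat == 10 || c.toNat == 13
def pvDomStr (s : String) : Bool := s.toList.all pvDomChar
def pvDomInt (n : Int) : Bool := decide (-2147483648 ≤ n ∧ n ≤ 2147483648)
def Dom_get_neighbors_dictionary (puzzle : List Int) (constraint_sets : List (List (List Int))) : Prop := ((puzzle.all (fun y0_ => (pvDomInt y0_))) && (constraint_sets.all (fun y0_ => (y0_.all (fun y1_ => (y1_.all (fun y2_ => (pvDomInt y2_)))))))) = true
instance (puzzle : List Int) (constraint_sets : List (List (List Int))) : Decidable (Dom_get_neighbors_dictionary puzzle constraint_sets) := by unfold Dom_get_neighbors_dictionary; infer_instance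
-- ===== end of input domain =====

-- B inverts A's loop nest (one pass over the groups, unioning each group into each in-range
-- member's set, then emitting the dictionary sorted by cell index) instead of scanning every
-- group once per puzzle cell; a timing run measured it faster on the generated inputs.

-- ===== PORT A =====
def get_neighbors_dictionary (puzzle : List Int) (constraint_sets : List (List (List Int))) : List (Int × List Int) :=
  -- for index, cell in enumerate(puzzle): for constraint_set in constraint_sets:
  --   for constrained_indices in constraint_set: if index in constrained_indices: neighbors[index] |= constrained_indices
  (((PySem.List.enumerate puzzle).foldl
      (fun d p =>
        constraint_sets.foldl
          (fun d constraint_set =>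
            constraint_set.foldl
              (fun d constrained_indices =>
                if PySem.Set.contains constrained_indices p.1 then
                  d.modify p.1 [] (fun s => PySem.Set.union s constrained_indices)
                else d)
              d)
          d)
      PySem.Dict.empty) : PySem.Dict Int (List Int)).items

-- ===== PORT B =====
def get_neighbors_dictionary_alt (puzzle : List Int) (constraint_sets : List (List (List Int))) : List (Int × List Int) :=
  let n : Int := puzzle.length
  let neighbors : PySem.Dict Int (List Int) :=
    constraint_sets.foldl
      (fun d constraint_set =>
        constraint_set.foldl
          (fun d group =>
            group.foldl
              (fun d member =>
                if 0 ≤ member ∧ member < n then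
                  d.modify member [] (fun s => PySem.Set.union s group)
                else d)
              d)
          d)
      PySem.Dict.empty
  PySem.List.sorted neighbors.items (fun item => item.1)

-- ===== PRECONDITION & SPEC =====
def Spec_get_neighbors_dictionary (puzzle : List Int) (constraint_sets : List (List (List Int))) (out : List (Int × List Int)) : Prop := out = get_neighbors_dictionary_alt puzzle constraint_sets
instance (puzzle : List Int) (constraint_sets : List (List (List Int))) (out : List (Int × List Int)) : Decidable (Spec_get_neighbors_dictionary puzzle constraint_sets out) := by unfold Spec_get_neighbors_dictionary; infer_instance

-- ===== CLAIM (what is proved, stated in full; the proofs are below) =====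
def Claim_equal_get_neighbors_dictionary : Prop := ∀ (puzzle : List Int) (constraint_sets : List (List (List Int))), Dom_get_neighbors_dictionary puzzle constraint_sets → Spec_get_neighbors_dictionary puzzle constraint_sets (get_neighbors_dictionary puzzle constraint_sets)

-- ===== LEMMAS AND PROOFS =====

-- hit/value abbreviations shared by both characterisations
def pvStep (d : PySem.Dict Int (List Int)) (k : Int) (g : List Int) : PySem.Dict Int (List Int) :=
  d.modify k [] (fun s => PySem.Set.union s g)
def pvStepA (k : Int) (d : PySem.Dict Int (List Int)) (g : List Int) : PySem.Dict Int (List Int) :=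
  if PySem.Set.contains g k then pvStep d k g else d
def pvStepB (n : Int) (g : List Int) (d : PySem.Dict Int (List Int)) (m : Int) : PySem.Dict Int (List Int) :=
  if 0 ≤ m ∧ m < n then pvStep d m g else d
def pvHit (gs : List (List Int)) (k : Int) : Bool := gs.any (fun g => PySem.Set.contains g k)
def pvV (gs : List (List Int)) (k : Int) (s0 : List Int) : List Int :=
  gs.foldl (fun s g => if PySem.Set.contains g k then PySem.Set.union s g else s) s0
def pvKA (gs : List (List Int)) (s : Int) : Nat → List Int
  | 0 => []
  | len+1 => (if pvHit gs s then [s] else []) ++ pvKA gs (s+1) len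

lemma pv_foldl_flatten {B S : Type} (css : List (List B)) (f : S → B → S) (d : S) :
    css.foldl (fun d c => c.foldl f d) d = css.flatten.foldl f d := by
  induction css generalizing d with
  | nil => rfl
  | cons c rest ih => simp [List.foldl_append, ih]

lemma pv_union_of_subset (g : List Int) : ∀ (t : List Int), (∀ x ∈ g, x ∈ t) →
    PySem.Set.union t g = t := by
  induction g with
  | nil => intro t _; rfl
  | cons x g' ih =>
    intro t h
    have hx : PySem.Set.add t x = t := PySem.Set.add_of_mem (h x (by simp))
    show PySem.Set.union (PySem.Set.add t x) g' = t
    rw [hx]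
    exact ih t (fun y hy => h y (by simp [hy]))

lemma pv_union_idem (s g : List Int) :
    PySem.Set.union (PySem.Set.union s g) g = PySem.Set.union s g := by
  refine pv_union_of_subset g _ (fun x hx => ?_)
  exact (PySem.Set.mem_union s g x).2 (Or.inr hx)

lemma pvA1getD (gs : List (List Int)) (k : Int) :
    ∀ (d : PySem.Dict Int (List Int)) (j : Int),
      (gs.foldl (pvStepA k) d).getD j [] =
        if j = k then pvV gs k (d.getD k []) else d.getD j [] := by
  induction gs with
  | nil => intro d j; by_cases h : j = k <;> simp [pvV, h]
  | cons g rest ih =>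
    intro d j
    show (rest.foldl (pvStepA k) (pvStepA k d g)).getD j [] = _
    rw [ih]
    by_cases hc : k ∈ g
    · by_cases h : j = k <;>
        simp [pvStepA, pvStep, pvV, hc, h, PySem.Dict.getD_modify_self,
          PySem.Dict.getD_modify_of_ne]
    · by_cases h : j = k <;> simp [pvStepA, pvV, hc, h]

lemma pvA1keys_stay (gs : List (List Int)) (k : Int) :
    ∀ (d : PySem.Dict Int (List Int)), d.contains k = true →
      (gs.foldl (pvStepA k) d).keys = d.keys := by
  induction gs with
  | nil => intro d _; rfl
  | cons g rest ih =>
    intro d hdc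
    show (rest.foldl (pvStepA k) (pvStepA k d g)).keys = _
    by_cases hc : k ∈ g
    · have hkeys : (pvStepA k d g).keys = d.keys := by
        rw [show pvStepA k d g = pvStep d k g from by simp [pvStepA, hc]]
        rw [pvStep, PySem.Dict.keys_modify]
        exact PySem.Dict.keys_insert_of_contains d _ hdc
      have h1 : (pvStepA k d g).contains k = true := by
        rw [PySem.Dict.contains_iff_mem_keys, hkeys, ← PySem.Dict.contains_iff_mem_keys]
        exact hdc
      rw [ih _ h1, hkeys]
    · rw [show pvStepA k d g = d from by simp [pvStepA, hc]]
      exact ih d hdc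

lemma pvA1keys_mem (gs : List (List Int)) (k : Int) :
    ∀ (d : PySem.Dict Int (List Int)), d.contains k = false →
      (gs.foldl (pvStepA k) d).keys = d.keys ++ (if pvHit gs k then [k] else []) := by
  induction gs with
  | nil => intro d _; simp [pvHit]
  | cons g rest ih =>
    intro d hdc
    show (rest.foldl (pvStepA k) (pvStepA k d g)).keys = _
    by_cases hc : k ∈ g
    · have hkeys : (pvStepA k d g).keys = d.keys ++ [k] := by
        rw [show pvStepA k d g = pvStep d k g from by simp [pvStepA, hc]]
        rw [pvStep, PySem.Dict.keys_modify]
        exact PySem.Dict.keys_insert_of_not_contains d _ hdc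
      have h1 : (pvStepA k d g).contains k = true := by
        rw [PySem.Dict.contains_iff_mem_keys, hkeys]; simp
      rw [pvA1keys_stay rest k _ h1, hkeys]
      simp [pvHit, PySem.Set.contains, hc]
    · rw [show pvStepA k d g = d from by simp [pvStepA, hc], ih d hdc]
      simp [pvHit, PySem.Set.contains, hc]

lemma pvV_not_hit (gs : List (List Int)) (k : Int) :
    ∀ (s0 : List Int), pvHit gs k = false → pvV gs k s0 = s0 := by
  induction gs with
  | nil => intro s0 _; rfl
  | cons g rest ih =>
    intro s0 h
    have h' : (PySem.Set.contains g k || pvHit rest k) = false := h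
    rw [Bool.or_eq_false_iff] at h'
    show pvV rest k (if PySem.Set.contains g k = true then PySem.Set.union s0 g else s0) = s0
    rw [h'.1]
    simpa using ih s0 h'.2

lemma pvAout (gs : List (List Int)) :
    ∀ (xs : List Int) (s : Int) (d : PySem.Dict Int (List Int)),
      (∀ k ∈ d.keys, k < s) →
      ((PySem.List.enumerate xs s).foldl (fun d p => gs.foldl (pvStepA p.1) d) d).keys
          = d.keys ++ pvKA gs s xs.length
      ∧ ∀ j, ((PySem.List.enumerate xs s).foldl (fun d p => gs.foldl (pvStepA p.1) d) d).getD j []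
          = if s ≤ j ∧ j < s + xs.length ∧ pvHit gs j then pvV gs j [] else d.getD j [] := by
  intro xs
  induction xs with
  | nil =>
    intro s d _
    constructor
    · simp [PySem.List.enumerate, pvKA]
    · intro j
      have hcond : ¬(s ≤ j ∧ j < s + (([] : List Int).length : Int) ∧ pvHit gs j = true) := by
        simp only [List.length_nil, Int.natCast_zero, add_zero]
        rintro ⟨h1, h2, _⟩; omega
      show d.getD j [] = _
      rw [if_neg hcond]
  | cons x rest ih =>
    intro s d hlt
    have hdc : d.contains s = false := by
      rw [← Bool.not_eq_true, PySem.Dict.contains_iff_mem_keys]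
      intro hmem
      exact absurd (hlt s hmem) (lt_irrefl s)
    have hshow : (PySem.List.enumerate (x :: rest) s) = (s, x) :: PySem.List.enumerate rest (s+1) := rfl
    set d1 := gs.foldl (pvStepA s) d with hd1
    have hk1 : d1.keys = d.keys ++ (if pvHit gs s then [s] else []) := pvA1keys_mem gs s d hdc
    have hg1 : ∀ j, d1.getD j [] = if j = s then pvV gs s [] else d.getD j [] := by
      intro j
      rw [hd1, pvA1getD gs s d j]
      rw [PySem.Dict.getD_of_not_contains d [] hdc]
    have hlt1 : ∀ k ∈ d1.keys, k < s + 1 := by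
      intro k hk
      rw [hk1] at hk
      rcases List.mem_append.1 hk with h | h
      · exact lt_trans (hlt k h) (by omega)
      · by_cases hh : pvHit gs s <;> simp [hh] at h
        omega
    obtain ⟨ihk, ihg⟩ := ih (s+1) d1 hlt1
    constructor
    · rw [hshow]
      show ((PySem.List.enumerate rest (s+1)).foldl (fun d p => gs.foldl (pvStepA p.1) d) d1).keys = _
      rw [ihk, hk1]
      show _ = d.keys ++ ((if pvHit gs s then [s] else []) ++ pvKA gs (s+1) rest.length)
      rw [List.append_assoc]
    · intro j
      rw [hshow]
      show ((PySem.List.enumerate rest (s+1)).foldl (fun d p => gs.foldl (pvStepA p.1) d) d1).getD j [] = _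
      rw [ihg j]
      by_cases h1 : s + 1 ≤ j ∧ j < (s+1) + (rest.length : Int) ∧ pvHit gs j
      · have h2 : s ≤ j ∧ j < s + ((x :: rest).length : Int) ∧ pvHit gs j := by
          refine ⟨by omega, by simp only [List.length_cons]; push_cast; omega, h1.2.2⟩
        rw [if_pos h1, if_pos h2]
      · rw [if_neg h1, hg1 j]
        by_cases hj : j = s
        · subst hj
          by_cases hh : pvHit gs j
          · have h2 : j ≤ j ∧ j < j + ((x :: rest).length : Int) ∧ pvHit gs j := by
              refine ⟨le_refl _, by simp only [List.length_cons]; push_cast; omega, hh⟩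
            rw [if_pos rfl, if_pos h2]
          · have h2 : ¬(j ≤ j ∧ j < j + ((x :: rest).length : Int) ∧ pvHit gs j) := by
              intro h; exact hh h.2.2
            rw [if_pos rfl, if_neg h2, PySem.Dict.getD_of_not_contains d [] hdc]
            exact pvV_not_hit gs j [] (by simpa using hh)
        · rw [if_neg hj]
          have h2 : ¬(s ≤ j ∧ j < s + ((x :: rest).length : Int) ∧ pvHit gs j) := by
            rintro ⟨ha, hb, hc⟩
            apply h1
            refine ⟨by omega, by simp only [List.length_cons] at hb ⊢; push_cast at hb ⊢; omega, hc⟩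
          rw [if_neg h2]

lemma pv_mem_pvKA (gs : List (List Int)) :
    ∀ (len : Nat) (s : Int) (j : Int),
      j ∈ pvKA gs s len ↔ (s ≤ j ∧ j < s + len ∧ pvHit gs j) := by
  intro len
  induction len with
  | zero => intro s j; simp [pvKA]; omega
  | succ m ih =>
    intro s j
    simp only [pvKA, List.mem_append, ih (s+1) j]
    by_cases h : pvHit gs s
    · simp [h]
      constructor
      · rintro (rfl | ⟨h1, h2, h3⟩)
        · exact ⟨le_refl _, by omega, h⟩
        · exact ⟨by omega, by omega, h3⟩
      · rintro ⟨h1, h2, h3⟩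
        by_cases hj : j = s
        · exact Or.inl hj
        · exact Or.inr ⟨by omega, by omega, h3⟩
    · simp [h]
      constructor
      · rintro ⟨h1, h2, h3⟩; exact ⟨by omega, by omega, h3⟩
      · rintro ⟨h1, h2, h3⟩
        refine ⟨by_contra fun hn => ?_, by omega, h3⟩
        have : j = s := by omega
        rw [this] at h3
        exact h (by simp [h3])
      

lemma pv_pairwise_pvKA (gs : List (List Int)) :
    ∀ (len : Nat) (s : Int), (pvKA gs s len).Pairwise (· < ·) := by
  intro len
  induction len with
  | zero => intro s; simp [pvKA]
  | succ m ih =>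
    intro s
    refine (List.pairwise_append).2 ⟨?_, ih (s+1), ?_⟩
    · by_cases h : pvHit gs s <;> simp [h]
    · intro a ha b hb
      have hb' := (pv_mem_pvKA gs m (s+1) b).1 hb
      have : a = s := by by_cases h : pvHit gs s <;> simp [h] at ha; exact ha
      omega

lemma pvB1getD (n : Int) (g : List Int) :
    ∀ (l : List Int) (d : PySem.Dict Int (List Int)) (j : Int), (∀ x ∈ l, x ∈ g) →
      (l.foldl (pvStepB n g) d).getD j [] =
        if j ∈ l ∧ 0 ≤ j ∧ j < n then PySem.Set.union (d.getD j []) g else d.getD j [] := by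
  intro l
  induction l with
  | nil => intro d j _; simp
  | cons m rest ih =>
    intro d j hsub
    show (rest.foldl (pvStepB n g) (pvStepB n g d m)).getD j [] = _
    rw [ih _ j (fun x hx => hsub x (by simp [hx]))]
    have hstepget : (pvStepB n g d m).getD j [] =
        if j = m ∧ 0 ≤ m ∧ m < n then PySem.Set.union (d.getD j []) g else d.getD j [] := by
      by_cases hm : 0 ≤ m ∧ m < n
      · rw [show pvStepB n g d m = pvStep d m g from by simp [pvStepB, hm]]
        by_cases hj : j = m
        · subst hj; simp [hm, pvStep, PySem.Dict.getD_modify_self]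
        · simp [hj, pvStep, PySem.Dict.getD_modify_of_ne d [] _ hj]
      · rw [show pvStepB n g d m = d from by simp [pvStepB, hm]]
        simp [hm]
    rw [hstepget]
    by_cases hj : j = m
    · subst hj
      by_cases hr : 0 ≤ j ∧ j < n <;> by_cases hjr : j ∈ rest <;>
        simp [hr, hjr, pv_union_idem]
    · by_cases hr : 0 ≤ j ∧ j < n <;> by_cases hjr : j ∈ rest <;>
        simp [hj, hr, hjr]

lemma pvB1keys_mem (n : Int) (g : List Int) :
    ∀ (l : List Int) (d : PySem.Dict Int (List Int)) (j : Int),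
      (j ∈ (l.foldl (pvStepB n g) d).keys ↔ j ∈ d.keys ∨ (j ∈ l ∧ 0 ≤ j ∧ j < n)) := by
  intro l
  induction l with
  | nil => intro d j; simp
  | cons m rest ih =>
    intro d j
    show j ∈ (rest.foldl (pvStepB n g) (pvStepB n g d m)).keys ↔ _
    rw [ih]
    have hstep : (j ∈ (pvStepB n g d m).keys) ↔ (j ∈ d.keys ∨ (j = m ∧ 0 ≤ m ∧ m < n)) := by
      by_cases hm : 0 ≤ m ∧ m < n
      · rw [show pvStepB n g d m = pvStep d m g from by simp [pvStepB, hm]]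
        simp [pvStep, PySem.Dict.keys_modify, PySem.Dict.mem_keys_insert, hm]
        tauto
      · rw [show pvStepB n g d m = d from by simp [pvStepB, hm]]
        simp [hm]
    rw [hstep]
    by_cases hj : j = m
    · subst hj
      constructor
      · rintro ((h | h) | h) <;> first | exact Or.inl h | exact Or.inr ⟨by tauto, by tauto⟩
      · rintro (h | ⟨h1, h2⟩)
        · exact Or.inl (Or.inl h)
        · exact Or.inl (Or.inr ⟨rfl, h2⟩)
    · constructor
      · rintro ((h | h) | h)
        · exact Or.inl h
        · exact absurd h.1 hj
        · exact Or.inr ⟨List.mem_cons.2 (Or.inr h.1), h.2.1, h.2.2⟩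
      · rintro (h | ⟨h1, h2, h3⟩)
        · exact Or.inl (Or.inl h)
        · rcases List.mem_cons.1 h1 with rfl | h1
          · exact absurd rfl hj
          · exact Or.inr ⟨h1, h2, h3⟩

lemma pvB1nodup (n : Int) (g : List Int) :
    ∀ (l : List Int) (d : PySem.Dict Int (List Int)),
      d.keys.Nodup → (l.foldl (pvStepB n g) d).keys.Nodup := by
  intro l
  induction l with
  | nil => intro d h; exact h
  | cons m rest ih =>
    intro d h
    refine ih _ ?_
    by_cases hm : 0 ≤ m ∧ m < n
    · rw [show pvStepB n g d m = pvStep d m g from by simp [pvStepB, hm]]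
      rw [pvStep, PySem.Dict.keys_modify]
      exact PySem.Dict.nodup_keys_insert d _ _ h
    · rw [show pvStepB n g d m = d from by simp [pvStepB, hm]]
      exact h

lemma pvBout_getD (n : Int) (gs : List (List Int)) :
    ∀ (d : PySem.Dict Int (List Int)) (j : Int),
      ((gs.foldl (fun d g => g.foldl (pvStepB n g) d) d).getD j []) =
        if 0 ≤ j ∧ j < n then pvV gs j (d.getD j []) else d.getD j [] := by
  induction gs with
  | nil => intro d j; by_cases hr : 0 ≤ j ∧ j < n <;> simp [pvV, hr]
  | cons g rest ih =>
    intro d j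
    show (rest.foldl _ (g.foldl (pvStepB n g) d)).getD j [] = _
    rw [ih]
    rw [pvB1getD n g g _ j (fun x hx => hx)]
    by_cases hr : 0 ≤ j ∧ j < n
    · by_cases hg : j ∈ g <;> simp [pvV, hr, hg, PySem.Set.contains]
    · simp [hr]

lemma pvBout_keys_mem (n : Int) (gs : List (List Int)) :
    ∀ (d : PySem.Dict Int (List Int)) (j : Int),
      (j ∈ (gs.foldl (fun d g => g.foldl (pvStepB n g) d) d).keys ↔
        j ∈ d.keys ∨ (0 ≤ j ∧ j < n ∧ ∃ g ∈ gs, j ∈ g)) := by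
  induction gs with
  | nil => intro d j; simp
  | cons g rest ih =>
    intro d j
    show j ∈ (rest.foldl _ (g.foldl (pvStepB n g) d)).keys ↔ _
    rw [ih, pvB1keys_mem n g g _ j]
    simp only [List.mem_cons]
    constructor
    · rintro ((h | ⟨h1, h2, h3⟩) | ⟨h1, h2, hg⟩)
      · exact Or.inl h
      · exact Or.inr ⟨h2, h3, g, by simp, h1⟩
      · obtain ⟨g', hg', hjg⟩ := hg
        exact Or.inr ⟨h1, h2, g', by simp [hg'], hjg⟩
    · rintro (h | ⟨h1, h2, g', hg', hjg⟩)
      · exact Or.inl (Or.inl h)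
      · rcases hg' with rfl | hg'
        · exact Or.inl (Or.inr ⟨hjg, h1, h2⟩)
        · exact Or.inr ⟨h1, h2, g', hg', hjg⟩

lemma pvBout_nodup (n : Int) (gs : List (List Int)) :
    ∀ (d : PySem.Dict Int (List Int)), d.keys.Nodup →
      (gs.foldl (fun d g => g.foldl (pvStepB n g) d) d).keys.Nodup := by
  induction gs with
  | nil => intro d h; exact h
  | cons g rest ih =>
    intro d h
    exact ih _ (pvB1nodup n g g d h)

lemma pv_hit_iff (gs : List (List Int)) (j : Int) :
    pvHit gs j = true ↔ ∃ g ∈ gs, j ∈ g := by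
  simp [pvHit, PySem.Set.contains, List.any_eq_true]

-- ===== VERDICT (by name: the statement is the Claim_ definition above) =====
theorem get_neighbors_dictionary_spec : Claim_equal_get_neighbors_dictionary := by
  intro puzzle css _
  show get_neighbors_dictionary puzzle css = get_neighbors_dictionary_alt puzzle css
  have hA : get_neighbors_dictionary puzzle css =
      ((PySem.List.enumerate puzzle).foldl
        (fun d p => css.flatten.foldl (pvStepA p.1) d) PySem.Dict.empty).items := by
    unfold get_neighbors_dictionary
    rw [show (fun (d : PySem.Dict Int (List Int)) (p : Int × Int) =>
        css.foldl (fun d cset => cset.foldl (fun d g =>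
          if PySem.Set.contains g p.1 then d.modify p.1 [] (fun s => PySem.Set.union s g) else d) d) d)
      = (fun d p => css.flatten.foldl (pvStepA p.1) d) from by
        funext d p
        rw [pv_foldl_flatten]
        rfl]
  have hB : get_neighbors_dictionary_alt puzzle css =
      PySem.List.sorted
        ((css.flatten.foldl
          (fun d g => g.foldl (pvStepB (puzzle.length : Int) g) d)
          (PySem.Dict.empty : PySem.Dict Int (List Int))).items)
        (fun item => item.1) := by
    unfold get_neighbors_dictionary_alt
    show PySem.List.sorted
        ((css.foldl
          (fun d cset => cset.foldl
            (fun d group => group.foldl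
              (fun d member =>
                if 0 ≤ member ∧ member < (puzzle.length : Int) then
                  d.modify member [] (fun s => PySem.Set.union s group)
                else d)
              d)
            d)
          (PySem.Dict.empty : PySem.Dict Int (List Int))).items)
        (fun item => item.1) = _
    rw [pv_foldl_flatten]
    rfl
  set gs := css.flatten with hgs
  set n : Int := (puzzle.length : Int) with hn
  set dA := (PySem.List.enumerate puzzle).foldl
      (fun d p => gs.foldl (pvStepA p.1) d) (PySem.Dict.empty : PySem.Dict Int (List Int)) with hdA
  set dB := gs.foldl (fun d g => g.foldl (pvStepB n g) d)
      (PySem.Dict.empty : PySem.Dict Int (List Int)) with hdB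
  obtain ⟨hKA, hGA⟩ := pvAout gs puzzle 0 PySem.Dict.empty (by simp [PySem.Dict.keys_empty])
  rw [PySem.Dict.keys_empty, List.nil_append] at hKA
  have hGA' : ∀ j, dA.getD j [] =
      if 0 ≤ j ∧ j < (puzzle.length : Int) ∧ pvHit gs j then pvV gs j [] else [] := by
    intro j
    rw [hdA, hGA j, PySem.Dict.getD_empty]
    simp only [zero_add]
  have hKAnd : (pvKA gs 0 puzzle.length).Nodup :=
    (pv_pairwise_pvKA gs puzzle.length 0).imp (fun h => ne_of_lt h)
  have hAnodup : dA.keys.Nodup := by rw [hdA, hKA]; exact hKAnd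
  have hBnodup : dB.keys.Nodup := pvBout_nodup n gs PySem.Dict.empty PySem.Dict.nodup_keys_empty
  have hBmem : ∀ j, j ∈ dB.keys ↔ (0 ≤ j ∧ j < n ∧ pvHit gs j = true) := by
    intro j
    rw [hdB, pvBout_keys_mem n gs PySem.Dict.empty j]
    rw [PySem.Dict.keys_empty]
    simp only [List.not_mem_nil, false_or]
    rw [pv_hit_iff gs j]
  have hGB : ∀ j, dB.getD j [] = if 0 ≤ j ∧ j < n then pvV gs j [] else [] := by
    intro j
    rw [hdB, pvBout_getD n gs PySem.Dict.empty j, PySem.Dict.getD_empty]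
  have hIA : dA.items = (pvKA gs 0 puzzle.length).map (fun k => (k, pvV gs k [])) := by
    rw [PySem.Dict.items_eq_map_keys dA hAnodup []]
    rw [show dA.keys = pvKA gs 0 puzzle.length from hKA]
    apply List.map_congr_left
    intro k hk
    obtain ⟨h1, h2, h3⟩ := (pv_mem_pvKA gs puzzle.length 0 k).1 hk
    rw [hGA' k, if_pos ⟨h1, by omega, h3⟩]
  have hIB : dB.items = dB.keys.map (fun k => (k, pvV gs k [])) := by
    rw [PySem.Dict.items_eq_map_keys dB hBnodup []]
    apply List.map_congr_left
    intro k hk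
    obtain ⟨h1, h2, _⟩ := (hBmem k).1 hk
    rw [hGB k, if_pos ⟨h1, h2⟩]
  have hpermK : (pvKA gs 0 puzzle.length).Perm dB.keys := by
    rw [List.perm_ext_iff_of_nodup hKAnd hBnodup]
    intro j
    rw [pv_mem_pvKA gs puzzle.length 0 j, hBmem j]
    constructor
    · rintro ⟨h1, h2, h3⟩; exact ⟨h1, by omega, h3⟩
    · rintro ⟨h1, h2, h3⟩; exact ⟨h1, by omega, h3⟩
  have hpermI : dA.items.Perm dB.items := by
    rw [hIA, hIB]
    exact hpermK.map _
  have hpw : dA.items.Pairwise (fun a b => a.1 < b.1) := by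
    rw [hIA, List.pairwise_map]
    exact pv_pairwise_pvKA gs puzzle.length 0
  rw [hA, hB]
  exact (PySem.List.sorted_eq_of_perm_of_pairwise_lt dB.items dA.items (fun item => item.1)
    hpermI hpw).symm
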